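-- pv_equiv track=rewrite | github.com/XavBertrand/ASR_jetson | src/asr_jetson/postprocessing/meeting_report.py | _normalize_points_sections
-- ===== SOURCE A (Python) =====
-- from typing import Any, Dict, List, Optional, Set, Tuple
--
-- def _normalize_points_sections(text: str) -> str:
--     """
--     Harmonise les listes des sections POINTS POSITIFS / POINTS DE FRICTION :
--     les items principaux restent en puces, les détails passent en sous-puces.
--     """
--     result: List[str] = []
--     in_points_block = False
--
--     def _is_points_header(line: str) -> bool:
--         stripped = line.strip().lower()
--         return stripped.startswith("### points positifs") or stripped.startswith(
--             "### points de friction"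
--         )
--
--     for line in text.splitlines():
--         stripped = line.lstrip()
--         if _is_points_header(line):
--             in_points_block = True
--             result.append(line.strip())
--             continue
--         if stripped.startswith("### ") and not _is_points_header(line):
--             in_points_block = False
--             result.append(line)
--             continue
--         if in_points_block and stripped.startswith("- "):
--             if stripped.startswith("- **"):
--                 result.append(f"- {stripped[2:].lstrip()}")
--             else:
--                 result.append(f"  - {stripped[2:].lstrip()}")
--             continue
--         result.append(line)
--
--     return "\n".join(result)
-- ===== SOURCE B (Python) =====
-- def _normalize_points_sections(text: str) -> str:
--     """Block-based rewrite: split into header-delimited blocks, transform points blocks."""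
--
--     def _is_points_header(line: str) -> bool:
--         s = line.strip().lower()
--         return s.startswith("### points positifs") or s.startswith("### points de friction")
--
--     def _is_header(line: str) -> bool:
--         return _is_points_header(line) or line.lstrip().startswith("### ")
--
--     blocks = []
--     cur = []
--     for line in text.splitlines():
--         if _is_header(line):
--             blocks.append(cur)
--             cur = [line]
--         else:
--             cur.append(line)
--     blocks.append(cur)
--
--     out = []
--     for blk in blocks:
--         if blk and _is_points_header(blk[0]):
--             out.append(blk[0].strip())
--             for line in blk[1:]:
--                 s = line.lstrip()
--                 if s.startswith("- "):
--                     rest = s[2:].lstrip()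
--                     out.append(("- " if s.startswith("- **") else "  - ") + rest)
--                 else:
--                     out.append(line)
--         else:
--             out.extend(blk)
--     return "\n".join(out)
-- ===== Notes on version B (the rewrite author's own statement) =====
-- stated objective: alternative
-- what changed: B replaces A's single-pass boolean state machine by a two-phase block decomposition: it first groups the lines into header-delimited blocks, then renders each block as a whole (transforming only blocks whose header is a points header).
import Mathlib
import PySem

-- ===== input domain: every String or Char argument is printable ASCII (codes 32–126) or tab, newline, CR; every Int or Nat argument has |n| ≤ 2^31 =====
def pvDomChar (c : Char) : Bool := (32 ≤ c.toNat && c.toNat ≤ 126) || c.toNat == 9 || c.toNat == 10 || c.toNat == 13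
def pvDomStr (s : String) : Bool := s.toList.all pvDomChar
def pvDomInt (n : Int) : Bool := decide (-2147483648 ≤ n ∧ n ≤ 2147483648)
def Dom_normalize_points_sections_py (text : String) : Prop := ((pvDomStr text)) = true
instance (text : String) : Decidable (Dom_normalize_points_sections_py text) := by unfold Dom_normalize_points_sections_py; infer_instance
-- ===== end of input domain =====

-- B re-derives the same normalisation via a two-phase block decomposition (group lines into
-- header-delimited blocks, then render each block) instead of A's single-pass boolean state machine;
-- objective: alternative structure, same cost.

-- ===== PORT A =====
def pvIsPointsHeaderA (line : String) : Bool :=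
  let stripped := PySem.Str.lower (PySem.Str.strip line)
  PySem.Str.startswith stripped "### points positifs" ||
    PySem.Str.startswith stripped "### points de friction"

def pvStepA (st : List String × Bool) (line : String) : List String × Bool :=
  let stripped := PySem.Str.lstrip line
  if pvIsPointsHeaderA line then
    (st.1 ++ [PySem.Str.strip line], true)
  else if PySem.Str.startswith stripped "### " && !(pvIsPointsHeaderA line) then
    (st.1 ++ [line], false)
  else if st.2 && PySem.Str.startswith stripped "- " then
    if PySem.Str.startswith stripped "- **" then
      (st.1 ++ ["- " ++ PySem.Str.lstrip (PySem.Str.slice stripped (some 2) none)], st.2)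
    else
      (st.1 ++ ["  - " ++ PySem.Str.lstrip (PySem.Str.slice stripped (some 2) none)], st.2)
  else
    (st.1 ++ [line], st.2)

def normalize_points_sections_py (text : String) : String :=
  PySem.Str.join "\n" ((PySem.Str.splitlines text).foldl pvStepA ([], false)).1

-- ===== PORT B =====
def pvIsPointsHeaderB (line : String) : Bool :=
  let s := PySem.Str.lower (PySem.Str.strip line)
  PySem.Str.startswith s "### points positifs" ||
    PySem.Str.startswith s "### points de friction"

def pvIsHeaderB (line : String) : Bool :=
  pvIsPointsHeaderB line || PySem.Str.startswith (PySem.Str.lstrip line) "### "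

def pvStepB (st : List (List String) × List String) (line : String) :
    List (List String) × List String :=
  if pvIsHeaderB line then (st.1 ++ [st.2], [line]) else (st.1, st.2 ++ [line])

def pvBulletB (line : String) : String :=
  let s := PySem.Str.lstrip line
  if PySem.Str.startswith s "- " then
    (if PySem.Str.startswith s "- **" then "- " else "  - ") ++
      PySem.Str.lstrip (PySem.Str.slice s (some 2) none)
  else line

def pvRenderB (blk : List String) : List String :=
  match blk with
  | [] => []
  | h :: rest =>
    if pvIsPointsHeaderB h then PySem.Str.strip h :: rest.map pvBulletB
    else h :: rest

def normalize_points_sections_py_alt (text : String) : String :=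
  PySem.Str.join "\n"
    (((((PySem.Str.splitlines text).foldl pvStepB ([], [])).1 ++
        [((PySem.Str.splitlines text).foldl pvStepB ([], [])).2]).foldl
      (fun out blk => out ++ pvRenderB blk) []))

-- ===== PRECONDITION & SPEC =====
def Spec_normalize_points_sections_py (text : String) (out : String) : Prop := out = normalize_points_sections_py_alt text
instance (text : String) (out : String) : Decidable (Spec_normalize_points_sections_py text out) := by unfold Spec_normalize_points_sections_py; infer_instance

-- ===== CLAIM (what is proved, stated in full; the proofs are below) =====
def Claim_equal_normalize_points_sections_py : Prop := ∀ (text : String), Dom_normalize_points_sections_py text → Spec_normalize_points_sections_py text (normalize_points_sections_py text)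

-- ===== LEMMAS AND PROOFS =====

-- Per-line transform under a "currently inside a points block" flag (A's third branch).
def pvTrans (b : Bool) (line : String) : String :=
  let stripped := PySem.Str.lstrip line
  if b && PySem.Str.startswith stripped "- " then
    if PySem.Str.startswith stripped "- **" then
      "- " ++ PySem.Str.lstrip (PySem.Str.slice stripped (some 2) none)
    else
      "  - " ++ PySem.Str.lstrip (PySem.Str.slice stripped (some 2) none)
  else line

-- Common characterisation: the output lines from state b.
def pvEmit : Bool → List String → List String
  | _, [] => []
  | b, l :: ls =>
    if pvIsPointsHeaderA l then PySem.Str.strip l :: pvEmit true ls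
    else if PySem.Str.startswith (PySem.Str.lstrip l) "### " then l :: pvEmit false ls
    else pvTrans b l :: pvEmit b ls

theorem pvIsPointsHeaderB_eq (l : String) : pvIsPointsHeaderB l = pvIsPointsHeaderA l := rfl

theorem pvFoldA_emit (ls : List String) : ∀ (acc : List String) (b : Bool),
    (ls.foldl pvStepA (acc, b)).1 = acc ++ pvEmit b ls := by
  induction ls with
  | nil => intro acc b; simp [pvEmit]
  | cons l ls ih =>
    intro acc b
    by_cases h1 : pvIsPointsHeaderA l
    · simp [pvStepA, pvEmit, h1, ih]
    · by_cases h2 : PySem.Chars.startswith (PySem.Chars.lstrip l.toList) ['#', '#', '#', ' '] = true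
      · simp [pvStepA, pvEmit, h1, h2, ih]
      · cases b with
        | false => simp [pvStepA, pvEmit, pvTrans, h1, h2, ih]
        | true =>
          by_cases h3 : PySem.Chars.startswith (PySem.Chars.lstrip l.toList) ['-', ' '] = true
          · by_cases h4 : PySem.Chars.startswith (PySem.Chars.lstrip l.toList) ['-', ' ', '*', '*'] = true
            · simp [pvStepA, pvEmit, pvTrans, h1, h2, h3, h4, ih]
            · simp [pvStepA, pvEmit, pvTrans, h1, h2, h3, h4, ih]
          · simp [pvStepA, pvEmit, pvTrans, h1, h2, h3, ih]

-- The "points" flag a block carries : whether its first line is a points header.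
def pvPts (cur : List String) : Bool :=
  match cur with
  | [] => false
  | h :: _ => pvIsPointsHeaderB h

theorem pvRender_append_nonheader (cur : List String) (l : String)
    (h : pvIsHeaderB l = false) :
    pvRenderB (cur ++ [l]) = pvRenderB cur ++ [pvTrans (pvPts cur) l] := by
  have h1 : pvIsPointsHeaderA l = false := by
    simp [pvIsHeaderB] at h; rw [← pvIsPointsHeaderB_eq]; exact h.1
  cases cur with
  | nil =>
    simp [pvRenderB, pvPts, pvTrans, pvIsPointsHeaderB_eq, h1]
  | cons c cs =>
    by_cases hp : pvIsPointsHeaderB c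
    · simp [pvRenderB, pvPts, hp, pvBulletB, pvTrans]
      split_ifs <;> rfl
    · simp [pvRenderB, pvPts, hp, pvTrans]

theorem pvFoldB_emit (ls : List String) :
    ∀ (blks : List (List String)) (cur : List String),
    (((ls.foldl pvStepB (blks, cur)).1 ++ [(ls.foldl pvStepB (blks, cur)).2]).foldl
        (fun out blk => out ++ pvRenderB blk) [])
      = (blks.foldl (fun out blk => out ++ pvRenderB blk) []) ++ pvRenderB cur
          ++ pvEmit (pvPts cur) ls := by
  induction ls with
  | nil =>
    intro blks cur
    simp [pvEmit]
  | cons l ls ih =>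
    intro blks cur
    by_cases hh : pvIsHeaderB l
    · have heq : (((l :: ls).foldl pvStepB (blks, cur))) = ls.foldl pvStepB (blks ++ [cur], [l]) := by
        simp [List.foldl_cons, pvStepB, hh]
      rw [heq, ih]
      by_cases hp : pvIsPointsHeaderB l
      · have hpA : pvIsPointsHeaderA l := by rw [← pvIsPointsHeaderB_eq]; exact hp
        simp [pvEmit, hpA, pvRenderB, hp, pvPts]
      · have hpA : pvIsPointsHeaderA l = false := by rw [← pvIsPointsHeaderB_eq]; simpa using hp
        have hg : PySem.Chars.startswith (PySem.Chars.lstrip l.toList) ['#', '#', '#', ' '] = true := by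
          simp [pvIsHeaderB, hp] at hh; simpa using hh
        simp [pvEmit, hpA, hg, pvRenderB, hp, pvPts]
    · have heq : (((l :: ls).foldl pvStepB (blks, cur))) = ls.foldl pvStepB (blks, cur ++ [l]) := by
        simp [List.foldl_cons, pvStepB, hh]
      rw [heq, ih]
      have hnh : pvIsHeaderB l = false := by simpa using hh
      have hpA : pvIsPointsHeaderA l = false := by
        simp [pvIsHeaderB] at hnh; rw [← pvIsPointsHeaderB_eq]; exact hnh.1
      have hg : PySem.Chars.startswith (PySem.Chars.lstrip l.toList) ['#', '#', '#', ' '] = false := by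
        simp [pvIsHeaderB] at hnh; exact hnh.2
      have hpts : pvPts (cur ++ [l]) = pvPts cur := by
        cases cur with
        | nil => simp [pvPts, pvIsPointsHeaderB_eq, hpA]
        | cons c cs => simp [pvPts]
      rw [pvRender_append_nonheader cur l hnh, hpts]
      simp [pvEmit, hpA, hg]

-- ===== VERDICT (by name: the statement is the Claim_ definition above) =====
theorem normalize_points_sections_py_spec : Claim_equal_normalize_points_sections_py := by
  intro text _
  unfold Spec_normalize_points_sections_py normalize_points_sections_py normalize_points_sections_py_alt
  rw [pvFoldA_emit, pvFoldB_emit]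
  simp [pvRenderB, pvPts]
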